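-- pv_equiv track=rewrite | github.com/GameAISchool2024members/NaturalLanguageCommanders | Assets/Scripts/play.py | step
-- ===== SOURCE A (Python) =====
-- def step(step_board, moves):
--   # Convert the board string into a 2D list for easy manipulation
--   board_lines = step_board.strip().split('\n')
--   board_grid = [list(line) for line in board_lines]
--
--   # Identify agent positions on the board
--   agent_positions = {}
--   for row in range(len(board_grid)):
--     for col in range(len(board_grid[row])):
--       if board_grid[row][col].isdigit():
--         agent_positions[int(board_grid[row][col])] = (row, col)
--
--   # Define movement vectors
--   move_vectors = {
--     'up': (-1, 0),
--     'down': (1, 0),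
--     'left': (0, -1),
--     'right': (0, 1)
--   }
--
--   # Move each agent according to the specified moves
--   for agent, direction in moves.items():
--     agent_num = int(agent.split('_')[1])
--     if agent_num in agent_positions:
--       row, col = agent_positions[agent_num]
--       move_vector = move_vectors[direction]
--       new_row, new_col = row + move_vector[0], col + move_vector[1]
--
--       # Check if the move is within the bounds and not blocked by a wall
--       if (0 <= new_row < len(board_grid) and 0 <= new_col < len(board_grid[0])
--           and board_grid[new_row][new_col] == ' '):
--         # Move the agent
--         board_grid[row][col] = ' '
--         board_grid[new_row][new_col] = str(agent_num)
--         # Update the agent's position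
--         agent_positions[agent_num] = (new_row, new_col)
--
--   # Convert the 2D list back to a string representation
--   new_board = '\n'.join([''.join(row) for row in board_grid])
--   return new_board
-- ===== SOURCE B (Python) =====
-- def step(step_board, moves):
--   # Parse the board; no position index is built: each move re-scans the live grid.
--   board_grid = [list(line) for line in step_board.strip().split('\n')]
--   move_vectors = {'up': (-1, 0), 'down': (1, 0), 'left': (0, -1), 'right': (0, 1)}
--
--   for agent, direction in moves.items():
--     target = str(int(agent.split('_')[1]))
--     pos = next(((r, c) for r, line in enumerate(board_grid)
--                        for c, ch in enumerate(line) if ch == target), None)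
--     if pos is None:
--       continue
--     dr, dc = move_vectors[direction]
--     nr, nc = pos[0] + dr, pos[1] + dc
--     if 0 <= nr < len(board_grid) and 0 <= nc < len(board_grid[0]) and board_grid[nr][nc] == ' ':
--       board_grid[pos[0]][pos[1]] = ' '
--       board_grid[nr][nc] = target
--
--   return '\n'.join(''.join(line) for line in board_grid)
-- ===== Notes on version B (the rewrite author's own statement) =====
-- stated objective: alternative
-- what changed: B drops A's pre-built agent_positions dictionary entirely and instead re-scans the live grid row by row on every move for the single cell holding the agent's digit, mutating the grid directly.
-- outside the precondition, e.g. on step('3 \n 3', {'agent_3': 'up'}): A returns '33\n  ', B returns '3 \n 3'; on step('12\n3', {'agent_3': 'up'}): A returns '12\n3', B returns '12\n3'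
import Mathlib
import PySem

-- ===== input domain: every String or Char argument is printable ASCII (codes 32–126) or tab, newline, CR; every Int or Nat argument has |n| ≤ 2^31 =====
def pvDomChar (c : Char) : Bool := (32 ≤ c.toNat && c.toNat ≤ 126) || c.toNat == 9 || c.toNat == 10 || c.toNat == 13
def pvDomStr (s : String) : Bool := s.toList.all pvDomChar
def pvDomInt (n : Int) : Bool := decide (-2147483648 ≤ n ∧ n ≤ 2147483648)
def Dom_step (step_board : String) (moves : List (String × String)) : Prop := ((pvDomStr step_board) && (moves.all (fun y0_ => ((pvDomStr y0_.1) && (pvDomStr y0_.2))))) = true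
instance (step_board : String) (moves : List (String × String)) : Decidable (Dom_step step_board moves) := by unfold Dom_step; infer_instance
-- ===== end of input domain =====

-- B replaces A's pre-built agent-position dictionary by a per-move scan of the live grid
-- (objective: alternative data structure / traversal, same observable result).

-- ===== PORT A =====
-- board string -> list of rows of characters  ( step_board.strip().split('\n') )
def pvParseGrid (s : String) : List (List Char) :=
  PySem.Chars.splitOn (PySem.Chars.strip s.toList) ['\n']

-- int(agent.split('_')[1]); none = IndexError/ValueError (excluded by Pre_step)
def pvParseAgent? (agent : String) : Option Int :=
  ((PySem.Chars.splitOn agent.toList ['_'])[1]?).bind PySem.Int.ofChars?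

-- move_vectors[direction]; the final (0,0) is Python's KeyError (unreached inside Pre_step)
def pvMoveVec (d : String) : Int × Int :=
  if d = "up" then (-1, 0)
  else if d = "down" then (1, 0)
  else if d = "left" then (0, -1)
  else if d = "right" then (0, 1)
  else (0, 0)

-- board_grid[r][c] as an Option (both Pythons only read cells that exist, inside Pre_step)
def pvGetCell (g : List (List Char)) (r c : Nat) : Option Char :=
  (g[r]?).bind (fun row => row[c]?)

-- board_grid[r][c] = ch (in range whenever either Python performs it, inside Pre_step)
def pvSetCell (g : List (List Char)) (r c : Nat) (ch : Char) : List (List Char) :=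
  g.set r ((g.getD r []).set c ch)

-- str(n) written into one cell: a single character whenever the write is reached
def pvDigitChar (n : Int) : Char := (PySem.Int.toChars n).headD ' '

-- '\n'.join(''.join(row) for row in g)
def pvJoin (g : List (List Char)) : String := String.ofList (PySem.Chars.join ['\n'] g)

-- the nested scan building agent_positions
def pvBuildPos (g : List (List Char)) : PySem.Dict Int (Nat × Nat) :=
  (List.range g.length).foldl (fun d r =>
    (List.range (g.getD r []).length).foldl (fun d c =>
      if PySem.Chars.isdigit ((g.getD r []).getD c ' ') then
        d.insert ((PySem.Int.ofChars? [(g.getD r []).getD c ' ']).getD 0) (r, c)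
      else d) d) PySem.Dict.empty

-- one iteration of A's loop over moves.items()
def pvStepA (st : List (List Char) × PySem.Dict Int (Nat × Nat)) (mv : String × String) :
    List (List Char) × PySem.Dict Int (Nat × Nat) :=
  match pvParseAgent? mv.1 with
  | none => st
  | some n =>
    if st.2.contains n then
      let p := st.2.getD n (0, 0)
      let v := pvMoveVec mv.2
      let nr : Int := (p.1 : Int) + v.1
      let nc : Int := (p.2 : Int) + v.2
      if 0 ≤ nr ∧ nr < (st.1.length : Int) ∧ 0 ≤ nc ∧ nc < ((st.1.getD 0 []).length : Int)
          ∧ pvGetCell st.1 nr.toNat nc.toNat = some ' ' then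
        (pvSetCell (pvSetCell st.1 p.1 p.2 ' ') nr.toNat nc.toNat (pvDigitChar n),
         st.2.insert n (nr.toNat, nc.toNat))
      else st
    else st

def step (step_board : String) (moves : List (String × String)) : String :=
  let g0 := pvParseGrid step_board
  pvJoin ((PySem.Dict.ofList moves).items.foldl pvStepA (g0, pvBuildPos g0)).1

-- ===== PORT B =====
-- scan the live grid row by row for the single cell equal to the one-character target
def pvFindCell (g : List (List Char)) (t : List Char) : Option (Nat × Nat) :=
  match g with
  | [] => none
  | row :: rest =>
    match row.findIdx? (fun ch => [ch] == t) with
    | some c => some (0, c)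
    | none => (pvFindCell rest t).map (fun p => (p.1 + 1, p.2))

-- one iteration of B's loop over moves.items(): no position dictionary, re-scan instead
def pvStepB (g : List (List Char)) (mv : String × String) : List (List Char) :=
  match pvParseAgent? mv.1 with
  | none => g
  | some n =>
    match pvFindCell g (PySem.Int.toChars n) with
    | none => g
    | some p =>
      let v := pvMoveVec mv.2
      let nr : Int := (p.1 : Int) + v.1
      let nc : Int := (p.2 : Int) + v.2
      if 0 ≤ nr ∧ nr < (g.length : Int) ∧ 0 ≤ nc ∧ nc < ((g.getD 0 []).length : Int)
          ∧ pvGetCell g nr.toNat nc.toNat = some ' ' then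
        pvSetCell (pvSetCell g p.1 p.2 ' ') nr.toNat nc.toNat (pvDigitChar n)
      else g

def step_alt (step_board : String) (moves : List (String × String)) : String :=
  let g0 := pvParseGrid step_board
  pvJoin ((PySem.Dict.ofList moves).items.foldl pvStepB g0)

-- ===== PRECONDITION & SPEC =====
-- direction ∈ move_vectors (else Python raises KeyError when the agent is on the board)
def pvDirOK (d : String) : Bool := d == "up" || d == "down" || d == "left" || d == "right"

-- a move is safe iff its agent name parses (int(agent.split('_')[1]) succeeds) and,
-- when that agent's digit is on the board, its direction is a real key of move_vectors
def pvMoveOK (g : List (List Char)) (mv : String × String) : Bool :=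
  match pvParseAgent? mv.1 with
  | none => false
  | some n =>
    !(g.flatten.any (fun ch => PySem.Chars.isdigit ch && PySem.Int.ofChars? [ch] == some n))
      || pvDirOK mv.2

-- Pre_step excludes (a) boards with a line shorter than the first line, on which A can raise
-- IndexError stepping into the short line; (b) boards carrying the same digit in two cells,
-- where which copy is "the agent" is an accident of A's last-wins dictionary build; and
-- (c) moves whose agent name does not parse (IndexError/ValueError) or whose direction is
-- not a move_vectors key while the agent is on the board (KeyError).
def Pre_step (step_board : String) (moves : List (String × String)) : Prop :=
  (∀ row ∈ pvParseGrid step_board, ((pvParseGrid step_board).getD 0 []).length ≤ row.length) ∧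
  ((pvParseGrid step_board).flatten.filter PySem.Chars.isdigit).Nodup ∧
  (∀ mv ∈ (PySem.Dict.ofList moves).items, pvMoveOK (pvParseGrid step_board) mv = true)

instance (step_board : String) (moves : List (String × String)) : Decidable (Pre_step step_board moves) := by
  unfold Pre_step; infer_instance

def pvWitness_step : String × (List (String × String)) := ("1 2\n# #", [("agent_1", "right")])

def Spec_step (step_board : String) (moves : List (String × String)) (out : String) : Prop := out = step_alt step_board moves
instance (step_board : String) (moves : List (String × String)) (out : String) : Decidable (Spec_step step_board moves out) := by unfold Spec_step; infer_instance

-- ===== CLAIM (what is proved, stated in full; the proofs are below) =====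
def Claim_equal_step : Prop := ∀ (step_board : String) (moves : List (String × String)), Dom_step step_board moves → Pre_step step_board moves → Spec_step step_board moves (step step_board moves)

-- ===== LEMMAS AND PROOFS =====

-- characters and digits -------------------------------------------------------

theorem pvChar_eq_of_toNat {c d : Char} (h : c.toNat = d.toNat) : c = d :=
  Char.ext (UInt32.toNat_inj.mp h)
theorem pvIsdigit_bounds {ch : Char} (h : PySem.Chars.isdigit ch = true) :
    48 ≤ ch.toNat ∧ ch.toNat ≤ 57 := by
  simp only [PySem.Chars.isdigit, Bool.and_eq_true, decide_eq_true_eq, Char.le_def] at h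
  exact h
theorem pvDigit_mem {ch : Char} (h : PySem.Chars.isdigit ch = true) :
    ch ∈ (['0','1','2','3','4','5','6','7','8','9'] : List Char) := by
  obtain ⟨h1, h2⟩ := pvIsdigit_bounds h
  have hd : ch.toNat = 48 ∨ ch.toNat = 49 ∨ ch.toNat = 50 ∨ ch.toNat = 51 ∨ ch.toNat = 52 ∨
      ch.toNat = 53 ∨ ch.toNat = 54 ∨ ch.toNat = 55 ∨ ch.toNat = 56 ∨ ch.toNat = 57 := by omega
  rcases hd with h'|h'|h'|h'|h'|h'|h'|h'|h'|h'
  · rw [pvChar_eq_of_toNat (show ch.toNat = Char.toNat '0' from h')]; decide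
  · rw [pvChar_eq_of_toNat (show ch.toNat = Char.toNat '1' from h')]; decide
  · rw [pvChar_eq_of_toNat (show ch.toNat = Char.toNat '2' from h')]; decide
  · rw [pvChar_eq_of_toNat (show ch.toNat = Char.toNat '3' from h')]; decide
  · rw [pvChar_eq_of_toNat (show ch.toNat = Char.toNat '4' from h')]; decide
  · rw [pvChar_eq_of_toNat (show ch.toNat = Char.toNat '5' from h')]; decide
  · rw [pvChar_eq_of_toNat (show ch.toNat = Char.toNat '6' from h')]; decide
  · rw [pvChar_eq_of_toNat (show ch.toNat = Char.toNat '7' from h')]; decide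
  · rw [pvChar_eq_of_toNat (show ch.toNat = Char.toNat '8' from h')]; decide
  · rw [pvChar_eq_of_toNat (show ch.toNat = Char.toNat '9' from h')]; decide

theorem pvToDigitsCore_succ (b fuel n : Nat) (ds : List Char) :
    Nat.toDigitsCore b (fuel+1) n ds =
      if n / b = 0 then (n % b).digitChar :: ds
      else Nat.toDigitsCore b fuel (n / b) ((n % b).digitChar :: ds) := rfl

theorem pvToDigitsCore_len (fuel n : Nat) (ds : List Char) :
    ds.length + 1 ≤ (Nat.toDigitsCore 10 (fuel + 1) n ds).length := by
  induction fuel generalizing n ds with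
  | zero => rw [pvToDigitsCore_succ]; split <;> simp [Nat.toDigitsCore]
  | succ f ih =>
    rw [pvToDigitsCore_succ]
    split
    · simp
    · have := ih (n / 10) ((n % 10).digitChar :: ds)
      simp only [List.length_cons] at this
      omega

theorem pvToChars_singleton {n : Int} {ch : Char} (h : PySem.Int.toChars n = [ch]) :
    0 ≤ n ∧ n ≤ 9 := by
  unfold PySem.Int.toChars at h
  split at h
  · exfalso
    have : n.natAbs + 1 - 1 + 1 = n.natAbs + 1 := rfl
    have hlen := pvToDigitsCore_len n.natAbs n.natAbs []
    simp only [List.length_nil] at hlen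
    have hl2 : ('-' :: Nat.toDigits 10 n.natAbs).length = 1 := by rw [h]; rfl
    simp only [List.length_cons] at hl2
    unfold Nat.toDigits at hl2
    omega
  · rename_i hneg
    push Not at hneg
    constructor
    · exact hneg
    · by_contra hgt
      push Not at hgt
      have h10 : 10 ≤ n.toNat := by omega
      unfold Nat.toDigits at h
      obtain ⟨m, hm⟩ : ∃ m, n.toNat = m + 1 := ⟨n.toNat - 1, by omega⟩
      rw [hm] at h
      rw [show m + 1 + 1 = (m + 1) + 1 from rfl, pvToDigitsCore_succ] at h
      split at h
      · rename_i h0; omega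
      · have := pvToDigitsCore_len m ((m+1) / 10) [((m+1) % 10).digitChar]
        rw [h] at this
        simp at this

-- cell access and update, and B's scanner -------------------------------------

theorem pvGetCell_pvSetCell {g : List (List Char)} {r c : Nat} {ch0 : Char}
    (h : pvGetCell g r c = some ch0) (ch : Char) (r' c' : Nat) :
    pvGetCell (pvSetCell g r c ch) r' c' =
      if r' = r ∧ c' = c then some ch else pvGetCell g r' c' := by
  unfold pvGetCell pvSetCell at *
  obtain ⟨row, hrow, hc⟩ : ∃ row, g[r]? = some row ∧ row[c]? = some ch0 := by
    cases hg : g[r]? with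
    | none => rw [hg] at h; simp at h
    | some row => rw [hg] at h; exact ⟨row, rfl, by simpa using h⟩
  have hrlt : r < g.length := (List.getElem?_eq_some_iff.mp hrow).1
  have hclt : c < row.length := (List.getElem?_eq_some_iff.mp hc).1
  have hgetD : g.getD r [] = row := by
    simp [List.getD, hrow]
  rw [hgetD]
  rw [List.getElem?_set]
  by_cases hr : r = r'
  · subst hr
    rw [if_pos rfl, if_pos hrlt]
    simp only [Option.bind_some, List.getElem?_set]
    by_cases hcc : c = c'
    · subst hcc
      simp [hclt]
    · rw [if_neg hcc]
      have hne : ¬ (True ∧ c' = c) := fun hx => hcc hx.2.symm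
      simp only [if_neg hne, hrow, Option.bind_some]
  · rw [if_neg hr]
    have : ¬ (r' = r ∧ c' = c) := fun hx => hr hx.1.symm
    rw [if_neg this]

theorem pvGetCell_cons_succ (row : List Char) (rest : List (List Char)) (r c : Nat) :
    pvGetCell (row :: rest) (r + 1) c = pvGetCell rest r c := rfl

theorem pvFindCell_eq_none {g : List (List Char)} {t : List Char}
    (h : ∀ r c ch, pvGetCell g r c = some ch → [ch] ≠ t) :
    pvFindCell g t = none := by
  induction g with
  | nil => rfl
  | cons row rest ih =>
    have hrow : row.findIdx? (fun ch => [ch] == t) = none := by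
      rw [List.findIdx?_eq_none_iff]
      intro x hx
      obtain ⟨c, hc, hcx⟩ := List.mem_iff_getElem.mp hx
      have := h 0 c x (by simpa [pvGetCell, hcx] using List.getElem?_eq_some_iff.mpr ⟨hc, hcx⟩)
      simpa using this
    have hrest : pvFindCell rest t = none := by
      apply ih
      intro r c ch hch
      exact h (r + 1) c ch (by rwa [pvGetCell_cons_succ])
    simp [pvFindCell, hrow, hrest]

theorem pvFindCell_eq_some {g : List (List Char)} {t : List Char} {p : Nat × Nat} {ch : Char}
    (hcell : pvGetCell g p.1 p.2 = some ch) (hch : [ch] = t)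
    (huniq : ∀ r c ch', pvGetCell g r c = some ch' → [ch'] = t → (r, c) = p) :
    pvFindCell g t = some p := by
  induction g generalizing p with
  | nil => simp [pvGetCell] at hcell
  | cons row rest ih =>
    obtain ⟨r, c⟩ := p
    cases r with
    | zero =>
      have hc : row[c]? = some ch := by simpa [pvGetCell] using hcell
      have hidx : row.findIdx? (fun ch => [ch] == t) = some c := by
        rw [List.findIdx?_eq_some_iff_getElem]
        refine ⟨(List.getElem?_eq_some_iff.mp hc).1, by
          simp [(List.getElem?_eq_some_iff.mp hc).2, hch], ?_⟩
        intro j hj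
        have hjlt : j < row.length := hj.trans (List.getElem?_eq_some_iff.mp hc).1
        simp only [beq_iff_eq]
        intro hbad
        have := huniq 0 j row[j]
          (by simpa [pvGetCell] using List.getElem?_eq_some_iff.mpr ⟨hjlt, rfl⟩)
          (by simpa using hbad)
        simp only [Prod.mk.injEq, true_and] at this
        omega
      simp [pvFindCell, hidx]
    | succ r =>
      have hrow : row.findIdx? (fun ch => [ch] == t) = none := by
        rw [List.findIdx?_eq_none_iff]
        intro x hx
        obtain ⟨j, hjlt, hjx⟩ := List.mem_iff_getElem.mp hx
        have := huniq 0 j x (by simpa [pvGetCell] using List.getElem?_eq_some_iff.mpr ⟨hjlt, hjx⟩)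
        show ([x] == t) = false
        rw [beq_eq_false_iff_ne]
        intro hbad
        exact absurd (this hbad) (by simp)
      have := ih (p := (r, c)) (by rwa [pvGetCell_cons_succ] at hcell) ?_
      · simp [pvFindCell, hrow, this]
      · intro r' c' ch' hcell' hmatch
        have := huniq (r' + 1) c' ch' (by rwa [pvGetCell_cons_succ]) hmatch
        simp only [Prod.mk.injEq] at this
        exact Prod.ext (by omega) this.2

-- the coupling invariant: A's dictionary names exactly the unique digit cells --

theorem pvToChars_digit {n : Int} (h0 : 0 ≤ n) (h9 : n ≤ 9) :
    PySem.Int.toChars n = [pvDigitChar n] ∧ PySem.Chars.isdigit (pvDigitChar n) = true ∧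
      PySem.Int.ofChars? [pvDigitChar n] = some n := by
  interval_cases n <;> exact ⟨rfl, rfl, rfl⟩

def pvInv (g : List (List Char)) (d : PySem.Dict Int (Nat × Nat)) : Prop :=
  ∀ n : Int,
    (∀ p, d.get? n = some p →
      0 ≤ n ∧ n ≤ 9 ∧ pvGetCell g p.1 p.2 = some (pvDigitChar n) ∧
      ∀ r c ch, pvGetCell g r c = some ch → ([ch] = PySem.Int.toChars n ↔ (r, c) = p)) ∧
    (d.get? n = none → ∀ r c ch, pvGetCell g r c = some ch → [ch] ≠ PySem.Int.toChars n)

theorem pvMatch_digit {m : Int} {ch : Char} (h : [ch] = PySem.Int.toChars m) :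
    0 ≤ m ∧ m ≤ 9 ∧ ch = pvDigitChar m := by
  obtain ⟨h0, h9⟩ := pvToChars_singleton h.symm
  obtain ⟨ht, _, _⟩ := pvToChars_digit h0 h9
  rw [ht] at h
  exact ⟨h0, h9, List.singleton_injective (by simpa using h)⟩

theorem pvDigitChar_inj {m n : Int} (hm0 : 0 ≤ m) (hm9 : m ≤ 9) (hn0 : 0 ≤ n) (hn9 : n ≤ 9)
    (h : pvDigitChar m = pvDigitChar n) : m = n := by
  obtain ⟨-, -, hm⟩ := pvToChars_digit hm0 hm9
  obtain ⟨-, -, hn⟩ := pvToChars_digit hn0 hn9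
  rw [h] at hm
  rw [hm] at hn
  exact Option.some_injective _ hn

theorem pvDigitChar_ne_space {n : Int} (h0 : 0 ≤ n) (h9 : n ≤ 9) : pvDigitChar n ≠ ' ' := by
  interval_cases n <;> decide

theorem pvInv_preserved {g : List (List Char)} {d : PySem.Dict Int (Nat × Nat)}
    {n : Int} {p : Nat × Nat} {q : Nat × Nat}
    (hinv : pvInv g d) (hg : d.get? n = some p)
    (htgt : pvGetCell g q.1 q.2 = some ' ') :
    pvInv (pvSetCell (pvSetCell g p.1 p.2 ' ') q.1 q.2 (pvDigitChar n)) (d.insert n q) := by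
  obtain ⟨hn0, hn9, hcell, huniq⟩ := (hinv n).1 p hg
  have hpq : p ≠ q := by
    intro h
    rw [h, htgt] at hcell
    exact pvDigitChar_ne_space hn0 hn9 (Option.some_injective _ hcell).symm
  have hcell1 : ∀ r c, pvGetCell (pvSetCell g p.1 p.2 ' ') r c =
      if r = p.1 ∧ c = p.2 then some ' ' else pvGetCell g r c :=
    fun r c => pvGetCell_pvSetCell hcell ' ' r c
  have htgt1 : pvGetCell (pvSetCell g p.1 p.2 ' ') q.1 q.2 = some ' ' := by
    rw [hcell1]; split
    · rfl
    · exact htgt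
  have hcell2 : ∀ r c, pvGetCell (pvSetCell (pvSetCell g p.1 p.2 ' ') q.1 q.2 (pvDigitChar n)) r c =
      if r = q.1 ∧ c = q.2 then some (pvDigitChar n)
      else if r = p.1 ∧ c = p.2 then some ' ' else pvGetCell g r c := by
    intro r c
    rw [pvGetCell_pvSetCell htgt1 _ r c]
    split
    · rfl
    · exact hcell1 r c
  intro m
  constructor
  · intro p' hp'
    rw [PySem.Dict.get?_insert] at hp'
    by_cases hmn : m = n
    · subst hmn
      rw [if_pos rfl] at hp'
      obtain rfl : q = p' := Option.some_injective _ hp'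
      refine ⟨hn0, hn9, by rw [hcell2]; simp, ?_⟩
      intro r c ch hch
      rw [hcell2] at hch
      split at hch
      · obtain rfl : _ = ch := Option.some_injective _ hch
        rename_i hh
        constructor
        · intro _; exact Prod.ext hh.1 hh.2
        · intro _; exact (pvToChars_digit hn0 hn9).1.symm
      · split at hch
        · obtain rfl : (' ' : Char) = ch := Option.some_injective _ hch
          constructor
          · intro hmatch
            exact absurd (pvMatch_digit hmatch).2.2.symm (pvDigitChar_ne_space hn0 hn9)
          · intro hrc
            rename_i hne _
            exact absurd ⟨congrArg Prod.fst hrc, congrArg Prod.snd hrc⟩ hne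
        · constructor
          · intro hmatch
            have := (huniq r c ch hch).mp hmatch
            rename_i hnp
            exact absurd ⟨congrArg Prod.fst this, congrArg Prod.snd this⟩ hnp
          · intro hrc
            rename_i hnq _
            exact absurd ⟨congrArg Prod.fst hrc, congrArg Prod.snd hrc⟩ hnq
    · rw [if_neg hmn] at hp'
      obtain ⟨hm0, hm9, hmcell, hmuniq⟩ := (hinv m).1 p' hp'
      have hmn' : pvDigitChar m ≠ pvDigitChar n :=
        fun h => hmn (pvDigitChar_inj hm0 hm9 hn0 hn9 h)
      have hp'q : p' ≠ q := by
        intro h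
        rw [h, htgt] at hmcell
        exact pvDigitChar_ne_space hm0 hm9 (Option.some_injective _ hmcell).symm
      have hp'p : p' ≠ p := by
        intro h
        rw [h, hcell] at hmcell
        exact hmn' (Option.some_injective _ hmcell).symm
      refine ⟨hm0, hm9, ?_, ?_⟩
      · rw [hcell2]
        rw [if_neg (fun hh => hp'q (Prod.ext hh.1 hh.2)), if_neg (fun hh => hp'p (Prod.ext hh.1 hh.2))]
        exact hmcell
      · intro r c ch hch
        rw [hcell2] at hch
        split at hch
        · obtain rfl : pvDigitChar n = ch := Option.some_injective _ hch
          rename_i hh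
          constructor
          · intro hmatch
            exact absurd (pvMatch_digit hmatch).2.2.symm hmn'
          · intro hrc
            exact absurd (hrc.symm.trans (Prod.ext hh.1 hh.2)) hp'q
        · split at hch
          · obtain rfl : (' ' : Char) = ch := Option.some_injective _ hch
            rename_i hh
            constructor
            · intro hmatch
              exact absurd (pvMatch_digit hmatch).2.2.symm (pvDigitChar_ne_space hm0 hm9)
            · intro hrc
              exact absurd (hrc.symm.trans (Prod.ext hh.1 hh.2)) hp'p
          · exact hmuniq r c ch hch
  · intro hnone r c ch hch hmatch
    rw [PySem.Dict.get?_insert] at hnone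
    by_cases hmn : m = n
    · subst hmn; simp at hnone
    · rw [if_neg hmn] at hnone
      obtain ⟨hm0, hm9, hchar⟩ := pvMatch_digit hmatch
      have hmn' : pvDigitChar m ≠ pvDigitChar n :=
        fun h => hmn (pvDigitChar_inj hm0 hm9 hn0 hn9 h)
      rw [hcell2] at hch
      split at hch
      · obtain rfl : pvDigitChar n = ch := Option.some_injective _ hch
        exact hmn' hchar.symm
      · split at hch
        · obtain rfl : (' ' : Char) = ch := Option.some_injective _ hch
          exact pvDigitChar_ne_space hm0 hm9 hchar.symm
        · exact (hinv m).2 hnone r c ch hch hmatch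

theorem pvStep_agree {g : List (List Char)} {d : PySem.Dict Int (Nat × Nat)}
    (hinv : pvInv g d) (mv : String × String) :
    pvStepB g mv = (pvStepA (g, d) mv).1 ∧ pvInv (pvStepA (g, d) mv).1 (pvStepA (g, d) mv).2 := by
  unfold pvStepA pvStepB
  cases hparse : pvParseAgent? mv.1 with
  | none => exact ⟨rfl, hinv⟩
  | some n =>
    cases hget : d.get? n with
    | none =>
      have hcont : d.contains n = false := by
        rw [PySem.Dict.contains_eq_isSome_get?, hget]; rfl
      have hfind : pvFindCell g (PySem.Int.toChars n) = none :=
        pvFindCell_eq_none (fun r c ch hch => (hinv n).2 hget r c ch hch)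
      simp only [hfind, hcont, Bool.false_eq_true, if_false]
      exact ⟨trivial, hinv⟩
    | some p =>
      have hcont : d.contains n = true := by
        rw [PySem.Dict.contains_eq_isSome_get?, hget]; rfl
      obtain ⟨hn0, hn9, hcell, huniq⟩ := (hinv n).1 p hget
      have hfind : pvFindCell g (PySem.Int.toChars n) = some p :=
        pvFindCell_eq_some hcell (pvToChars_digit hn0 hn9).1.symm
          (fun r c ch hch hm => (huniq r c ch hch).mp hm)
      have hgetD : d.getD n (0, 0) = p := by
        rw [PySem.Dict.getD_eq_get?_getD, hget]; rfl
      simp only [hfind, hcont, if_true, hgetD]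
      split
      · rename_i hcond
        exact ⟨rfl, pvInv_preserved hinv hget hcond.2.2.2.2⟩
      · exact ⟨rfl, hinv⟩

theorem pvFold_agree (items : List (String × String)) (g : List (List Char))
    (d : PySem.Dict Int (Nat × Nat)) (hinv : pvInv g d) :
    (items.foldl pvStepA (g, d)).1 = items.foldl pvStepB g := by
  induction items generalizing g d with
  | nil => rfl
  | cons mv rest ih =>
    obtain h2 := pvStep_agree hinv mv
    simp only [List.foldl_cons, h2.1]
    have := ih (pvStepA (g, d) mv).1 (pvStepA (g, d) mv).2 h2.2
    simpa using this

-- the initial dictionary ------------------------------------------------------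

-- ---- the initial dictionary: A's nested build scan as a flat list of digit entries ----

theorem pvDigit_val {ch : Char} (h : PySem.Chars.isdigit ch = true) :
    ∃ n : Int, PySem.Int.ofChars? [ch] = some n ∧ 0 ≤ n ∧ n ≤ 9 ∧
      PySem.Int.toChars n = [ch] := by
  have := pvDigit_mem h
  fin_cases this <;> exact ⟨_, rfl, by decide, by decide, rfl⟩

def pvVal (ch : Char) : Int := (PySem.Int.ofChars? [ch]).getD 0

def pvRowEntries (r : Nat) : Nat → List Char → List (Int × (Nat × Nat))
  | _, [] => []
  | c, ch :: rest =>
    (if PySem.Chars.isdigit ch then [(pvVal ch, (r, c))] else []) ++ pvRowEntries r (c + 1) rest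

def pvEntries : Nat → List (List Char) → List (Int × (Nat × Nat))
  | _, [] => []
  | r, row :: rest => pvRowEntries r 0 row ++ pvEntries (r + 1) rest

theorem pvRowEntries_snoc (r : Nat) (row : List Char) (x : Char) : ∀ c,
    pvRowEntries r c (row ++ [x]) =
      pvRowEntries r c row ++
        (if PySem.Chars.isdigit x then [(pvVal x, (r, c + row.length))] else []) := by
  induction row with
  | nil => intro c; simp [pvRowEntries]
  | cons ch rest ih =>
    intro c
    simp only [List.cons_append, pvRowEntries, ih (c + 1), List.append_assoc,
      List.length_cons]
    have : c + 1 + rest.length = c + (rest.length + 1) := by omega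
    rw [this]

theorem pvEntries_snoc (g : List (List Char)) (row : List Char) : ∀ r,
    pvEntries r (g ++ [row]) = pvEntries r g ++ pvRowEntries (r + g.length) 0 row := by
  induction g with
  | nil => intro r; simp [pvEntries]
  | cons hd tl ih =>
    intro r
    simp only [List.cons_append, pvEntries, ih (r + 1), List.append_assoc, List.length_cons]
    have : r + 1 + tl.length = r + (tl.length + 1) := by omega
    rw [this]

theorem pvRow_bridge (row : List Char) (r : Nat) (d : PySem.Dict Int (Nat × Nat)) :
    (List.range row.length).foldl (fun d c =>
      if PySem.Chars.isdigit (row.getD c ' ') then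
        d.insert ((PySem.Int.ofChars? [row.getD c ' ']).getD 0) (r, c)
      else d) d =
    (pvRowEntries r 0 row).foldl (fun d e => d.insert e.1 e.2) d := by
  induction row using List.reverseRecOn generalizing d with
  | nil => rfl
  | append_singleton row x ih =>
    rw [List.length_append, List.length_singleton, List.range_succ, List.foldl_append]
    have hcongr : (List.range row.length).foldl (fun d c =>
        if PySem.Chars.isdigit ((row ++ [x]).getD c ' ') then
          d.insert ((PySem.Int.ofChars? [(row ++ [x]).getD c ' ']).getD 0) (r, c)
        else d) d =
      (List.range row.length).foldl (fun d c =>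
        if PySem.Chars.isdigit (row.getD c ' ') then
          d.insert ((PySem.Int.ofChars? [row.getD c ' ']).getD 0) (r, c)
        else d) d := by
      refine PySem.List.foldl_congr_mem _ _ _ _ ?_
      intro acc c hc
      rw [List.getD_append _ _ _ _ (List.mem_range.mp hc)]
    rw [hcongr, ih d, pvRowEntries_snoc, List.foldl_append]
    have hx : (row ++ [x]).getD row.length ' ' = x := by
      rw [List.getD_append_right _ _ _ _ (le_refl _)]
      simp
    simp only [List.foldl_cons, List.foldl_nil, hx, Nat.zero_add]
    split
    · rfl
    · rfl

theorem pvBuildPos_eq (g : List (List Char)) :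
    pvBuildPos g = (pvEntries 0 g).foldl (fun d e => d.insert e.1 e.2) PySem.Dict.empty := by
  unfold pvBuildPos
  generalize PySem.Dict.empty = d
  induction g using List.reverseRecOn generalizing d with
  | nil => rfl
  | append_singleton g row ih =>
    rw [List.length_append, List.length_singleton, List.range_succ, List.foldl_append]
    have hcongr : (List.range g.length).foldl (fun d r =>
        (List.range (((g ++ [row]).getD r []).length)).foldl (fun d c =>
          if PySem.Chars.isdigit (((g ++ [row]).getD r []).getD c ' ') then
            d.insert ((PySem.Int.ofChars? [((g ++ [row]).getD r []).getD c ' ']).getD 0) (r, c)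
          else d) d) d =
      (List.range g.length).foldl (fun d r =>
        (List.range ((g.getD r []).length)).foldl (fun d c =>
          if PySem.Chars.isdigit ((g.getD r []).getD c ' ') then
            d.insert ((PySem.Int.ofChars? [(g.getD r []).getD c ' ']).getD 0) (r, c)
          else d) d) d := by
      refine PySem.List.foldl_congr_mem _ _ _ _ ?_
      intro acc rr hrr
      rw [List.getD_append _ _ _ _ (List.mem_range.mp hrr)]
    rw [hcongr, ih d, pvEntries_snoc, List.foldl_append]
    have hrow : (g ++ [row]).getD g.length [] = row := by
      rw [List.getD_append_right _ _ _ _ (le_refl _)]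
      simp
    simp only [List.foldl_cons, List.foldl_nil, hrow, Nat.zero_add]
    exact pvRow_bridge row g.length _

theorem pvRowEntries_keys (r : Nat) (row : List Char) : ∀ c,
    (pvRowEntries r c row).map Prod.fst = (row.filter PySem.Chars.isdigit).map pvVal := by
  induction row with
  | nil => intro c; rfl
  | cons ch rest ih =>
    intro c
    simp only [pvRowEntries, List.map_append, ih (c + 1), List.filter_cons]
    split
    · simp
    · simp

theorem pvEntries_keys (g : List (List Char)) : ∀ r,
    (pvEntries r g).map Prod.fst = (g.flatten.filter PySem.Chars.isdigit).map pvVal := by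
  induction g with
  | nil => intro r; rfl
  | cons row rest ih =>
    intro r
    simp only [pvEntries, List.map_append, List.flatten_cons, List.filter_append,
      pvRowEntries_keys, ih (r + 1)]

theorem pvVal_inj {a b : Char} (ha : PySem.Chars.isdigit a = true)
    (hb : PySem.Chars.isdigit b = true) (h : pvVal a = pvVal b) : a = b := by
  obtain ⟨na, hna, -, -, hta⟩ := pvDigit_val ha
  obtain ⟨nb, hnb, -, -, htb⟩ := pvDigit_val hb
  have : na = nb := by
    simpa [pvVal, hna, hnb] using h
  rw [this] at hta
  exact List.singleton_injective (hta.symm.trans htb)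

theorem pvRowEntries_mem (r : Nat) (row : List Char) : ∀ c n r' c',
    ((n, (r', c')) ∈ pvRowEntries r c row ↔
      r' = r ∧ c ≤ c' ∧ ∃ ch, row[c' - c]? = some ch ∧ PySem.Chars.isdigit ch = true ∧ pvVal ch = n) := by
  induction row with
  | nil => intro c n r' c'; simp [pvRowEntries]
  | cons ch rest ih =>
    intro c n r' c'
    simp only [pvRowEntries, List.mem_append, ih (c + 1)]
    constructor
    · rintro (hin | ⟨rfl, hcc, ch', hch', hd, hv⟩)
      · split at hin
        · rename_i hd
          simp only [List.mem_singleton, Prod.mk.injEq] at hin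
          obtain ⟨rfl, rfl, rfl⟩ := hin
          exact ⟨rfl, le_refl _, ch, by simp, hd, rfl⟩
        · simp at hin
      · refine ⟨rfl, by omega, ch', ?_, hd, hv⟩
        have : c' - c = (c' - (c + 1)) + 1 := by omega
        rw [this, List.getElem?_cons_succ]
        exact hch'
    · rintro ⟨rfl, hcc, ch', hch', hd, hv⟩
      rcases Nat.eq_or_lt_of_le hcc with rfl | hlt
      · simp only [Nat.sub_self, List.getElem?_cons_zero] at hch'
        obtain rfl : ch = ch' := Option.some_injective _ hch'
        left
        simp [hd, hv.symm]
      · right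
        refine ⟨rfl, by omega, ch', ?_, hd, hv⟩
        have : c' - c = (c' - (c + 1)) + 1 := by omega
        rw [this, List.getElem?_cons_succ] at hch'
        exact hch'

theorem pvEntries_mem (g : List (List Char)) : ∀ r n r' c',
    ((n, (r', c')) ∈ pvEntries r g ↔
      r ≤ r' ∧ ∃ ch, pvGetCell g (r' - r) c' = some ch ∧ PySem.Chars.isdigit ch = true ∧ pvVal ch = n) := by
  induction g with
  | nil => intro r n r' c'; simp [pvEntries, pvGetCell]
  | cons row rest ih =>
    intro r n r' c'
    simp only [pvEntries, List.mem_append, pvRowEntries_mem, ih (r + 1)]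
    constructor
    · rintro (⟨rfl, -, ch', hch', hd, hv⟩ | ⟨hrr, ch', hch', hd, hv⟩)
      · exact ⟨le_refl _, ch', by simpa [pvGetCell, Nat.sub_self] using hch', hd, hv⟩
      · refine ⟨by omega, ch', ?_, hd, hv⟩
        have : r' - r = (r' - (r + 1)) + 1 := by omega
        rw [this, pvGetCell_cons_succ]
        exact hch'
    · rintro ⟨hrr, ch', hch', hd, hv⟩
      rcases Nat.eq_or_lt_of_le hrr with rfl | hlt
      · left
        refine ⟨rfl, Nat.zero_le _, ch', ?_, hd, hv⟩
        simpa [pvGetCell, Nat.sub_self] using hch'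
      · right
        refine ⟨by omega, ch', ?_, hd, hv⟩
        have : r' - r = (r' - (r + 1)) + 1 := by omega
        rw [this, pvGetCell_cons_succ] at hch'
        exact hch'

theorem pvBuildPos_items {g : List (List Char)}
    (hnd : (g.flatten.filter PySem.Chars.isdigit).Nodup) :
    (pvBuildPos g).items = pvEntries 0 g ∧ (pvBuildPos g).keys.Nodup := by
  have hkeys : ((pvEntries 0 g).map Prod.fst).Nodup := by
    rw [pvEntries_keys]
    refine hnd.map_on ?_
    intro x hx y hy hxy
    exact pvVal_inj (List.of_mem_filter hx) (List.of_mem_filter hy) hxy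
  have hitems : (pvBuildPos g).items = pvEntries 0 g := by
    rw [pvBuildPos_eq]
    have := PySem.Dict.items_foldl_insert_fresh (pvEntries 0 g) Prod.fst Prod.snd
      PySem.Dict.empty (fun a _ => by simp [PySem.Dict.contains_empty]) hkeys
    simpa using this
  refine ⟨hitems, ?_⟩
  have : (pvBuildPos g).keys = (pvBuildPos g).items.map Prod.fst := rfl
  rw [this, hitems]
  exact hkeys

theorem pvBuildPos_get? {g : List (List Char)}
    (hnd : (g.flatten.filter PySem.Chars.isdigit).Nodup) (n : Int) (p : Nat × Nat) :
    ((pvBuildPos g).get? n = some p ↔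
      ∃ ch, pvGetCell g p.1 p.2 = some ch ∧ PySem.Chars.isdigit ch = true ∧ pvVal ch = n) := by
  obtain ⟨hitems, hkeys⟩ := pvBuildPos_items hnd
  rw [PySem.Dict.get?_eq_some_iff_mem_items _ _ _ hkeys, hitems]
  have := pvEntries_mem g 0 n p.1 p.2
  simpa [Nat.sub_zero] using this

theorem pvBuildPos_inv {g : List (List Char)}
    (hnd : (g.flatten.filter PySem.Chars.isdigit).Nodup) :
    pvInv g (pvBuildPos g) := by
  intro n
  constructor
  · intro p hp
    obtain ⟨ch, hcell, hd, hv⟩ := (pvBuildPos_get? hnd n p).mp hp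
    obtain ⟨m, hm, hm0, hm9, htm⟩ := pvDigit_val hd
    have hvn : m = n := by simpa [pvVal, hm] using hv
    subst hvn
    obtain ⟨ht, -, -⟩ := pvToChars_digit hm0 hm9
    have hch : ch = pvDigitChar m := List.singleton_injective (htm.symm.trans ht)
    refine ⟨hm0, hm9, by rwa [hch] at hcell, ?_⟩
    intro r c ch' hch' 
    constructor
    · intro hmatch
      obtain ⟨-, -, hchar⟩ := pvMatch_digit hmatch
      have hmem : (pvBuildPos g).get? m = some (r, c) := by
        refine (pvBuildPos_get? hnd m (r, c)).mpr ⟨ch', hch', ?_, ?_⟩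
        · rw [hchar]; exact (pvToChars_digit hm0 hm9).2.1
        · rw [hchar]
          simp [pvVal, (pvToChars_digit hm0 hm9).2.2]
      have := hmem.symm.trans hp
      exact (Option.some_injective _ this)
    · intro hrc
      have h1 : r = p.1 := by simpa using congrArg Prod.fst hrc
      have h2 : c = p.2 := by simpa using congrArg Prod.snd hrc
      rw [h1, h2, hcell] at hch'
      obtain rfl : ch = ch' := Option.some_injective _ hch'
      rw [htm]
  · intro hnone r c ch hch hmatch
    obtain ⟨h0, h9, hchar⟩ := pvMatch_digit hmatch
    have : (pvBuildPos g).get? n = some (r, c) := by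
      refine (pvBuildPos_get? hnd n (r, c)).mpr ⟨ch, hch, ?_, ?_⟩
      · rw [hchar]; exact (pvToChars_digit h0 h9).2.1
      · rw [hchar]
        simp [pvVal, (pvToChars_digit h0 h9).2.2]
    rw [hnone] at this
    simp at this

-- ===== VERDICT (by name: the statement is the Claim_ definition above) =====
theorem step_spec : Claim_equal_step := by
  intro step_board moves _hdom hpre
  unfold Spec_step step step_alt
  have h := pvFold_agree (PySem.Dict.ofList moves).items (pvParseGrid step_board)
    (pvBuildPos (pvParseGrid step_board)) (pvBuildPos_inv hpre.2.1)
  simp only [h]
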